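-- pv_equiv track=rewrite | github.com/GauchoAI/chuk-lazurus | examples/inference/demo_a_parametric_recall.py | detect_hedging
-- ===== SOURCE A (Python) =====
-- def detect_hedging(answer: str) -> bool:
--     """Check if the answer contains hedging language."""
--     hedges = [
--         "i think", "i believe", "i'm not sure", "i don't know",
--         "uncertain", "possibly", "perhaps", "might be", "may have",
--         "it's unclear", "not certain",
--     ]
--     lower = answer.lower()
--     return any(h in lower for h in hedges)
-- ===== SOURCE B (Python) =====
-- def detect_hedging(answer: str) -> bool:
--     """Check if the answer contains hedging language."""
--     hedges = [
--         "i think", "i believe", "i'm not sure", "i don't know",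
--         "uncertain", "possibly", "perhaps", "might be", "may have",
--         "it's unclear", "not certain",
--     ]
--     lower = answer.lower()
--     # single left-to-right scan over positions: does any hedge start here?
--     return any(
--         any(lower.startswith(h, i) for h in hedges)
--         for i in range(len(lower) + 1)
--     )
-- ===== Notes on version B (the rewrite author's own statement) =====
-- stated objective: alternative
-- what changed: Replaces the per-phrase substring search (one 'h in lower' scan per hedge) by a single position-driven scan of the lowercased answer that at each index checks whether any hedge phrase starts there.
import Mathlib
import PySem

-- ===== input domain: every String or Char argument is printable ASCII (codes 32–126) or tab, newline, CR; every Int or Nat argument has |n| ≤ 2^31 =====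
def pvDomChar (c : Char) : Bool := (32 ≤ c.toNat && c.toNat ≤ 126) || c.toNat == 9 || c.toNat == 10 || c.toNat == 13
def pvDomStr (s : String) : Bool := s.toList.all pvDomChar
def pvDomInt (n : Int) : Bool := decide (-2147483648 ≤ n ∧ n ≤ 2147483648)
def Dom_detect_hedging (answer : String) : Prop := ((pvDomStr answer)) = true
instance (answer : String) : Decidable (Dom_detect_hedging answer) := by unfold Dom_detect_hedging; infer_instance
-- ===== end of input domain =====

-- B replaces the per-phrase substring search by a single position-driven scan of the
-- lowercased answer (at each index: does some hedge start here?); alternative structure, same cost.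

-- the hedge phrases (shared constant of both Pythons)
def pvHedges : List String :=
  ["i think", "i believe", "i'm not sure", "i don't know",
   "uncertain", "possibly", "perhaps", "might be", "may have",
   "it's unclear", "not certain"]

-- ===== PORT A =====
def detect_hedging (answer : String) : Bool :=
  let lower := PySem.Str.lower answer
  pvHedges.any (fun h => PySem.Str.isIn h lower)

-- ===== PORT B =====
-- lower.startswith(h, i) for 0 ≤ i ≤ len(lower) is exactly: h is a prefix of lower's suffix at i
def detect_hedging_alt (answer : String) : Bool :=
  let cs := PySem.Chars.lower answer.toList
  (List.range (cs.length + 1)).any (fun i =>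
    pvHedges.any (fun h => PySem.Chars.startswith (cs.drop i) h.toList))

-- ===== PRECONDITION & SPEC =====
def Spec_detect_hedging (answer : String) (out : Bool) : Prop := out = detect_hedging_alt answer
instance (answer : String) (out : Bool) : Decidable (Spec_detect_hedging answer out) := by unfold Spec_detect_hedging; infer_instance

-- ===== CLAIM (what is proved, stated in full; the proofs are below) =====
def Claim_equal_detect_hedging : Prop := ∀ (answer : String), Dom_detect_hedging answer → Spec_detect_hedging answer (detect_hedging answer)

-- ===== LEMMAS AND PROOFS =====

-- 'sub in s' holds iff some bounded start index carries sub as a prefix of the suffix there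
lemma isIn_iff_exists_bounded (sub s : List Char) :
    PySem.Chars.isIn sub s = true ↔ ∃ i < s.length + 1, sub <+: s.drop i := by
  rw [← PySem.Chars.exists_prefix_drop_iff_isIn]
  constructor
  · rintro ⟨j, hj⟩
    exact ⟨min j s.length, by omega, by
      rcases le_or_gt j s.length with h | h
      · simpa [min_eq_left h] using hj
      · have : s.drop j = [] := List.drop_eq_nil_of_le (by omega)
        simp [min_eq_right (le_of_lt h), List.drop_length, this ▸ hj]⟩
  · rintro ⟨i, _, hi⟩
    exact ⟨i, hi⟩

-- ===== VERDICT (by name: the statement is the Claim_ definition above) =====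
theorem detect_hedging_spec : Claim_equal_detect_hedging := by
  intro answer _
  unfold Spec_detect_hedging detect_hedging detect_hedging_alt
  rw [Bool.eq_iff_iff]
  simp only [List.any_eq_true, List.mem_range, PySem.Str.isIn_eq,
    PySem.Str.toList_lower, PySem.Chars.startswith_iff]
  constructor
  · rintro ⟨h, hmem, hin⟩
    obtain ⟨i, hi, hp⟩ := (isIn_iff_exists_bounded _ _).mp hin
    exact ⟨i, hi, h, hmem, hp⟩
  · rintro ⟨i, hi, h, hmem, hp⟩
    exact ⟨h, hmem, (isIn_iff_exists_bounded _ _).mpr ⟨i, hi, hp⟩⟩
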